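-- pv_equiv track=rewrite | github.com/rlfslf111/Algorithm | 1206_View_길민규.py | building
-- ===== SOURCE A (Python) =====
-- def bubble_sort(li):
--     for x in range(len(li)):
--         for i in range(len(li)-1-x):
--             if li[i]>li[i+1]:
--                 li[i],li[i+1]=li[i+1],li[i]
--
-- def building(num):
--     test_list=list()
--     result=0
--     for x in range(2,len(num)-2):
--         sum_list=list()
--         for i in range(x-2,x+3):
--             sum_list.append(num[i])
--             bubble_sort(sum_list)
--         if num[x]==sum_list[-1]:
--             result+=sum_list[-1]-sum_list[-2]
--     return result
-- ===== SOURCE B (Python) =====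
-- def building(num):
--     result = 0
--     for x in range(2, len(num) - 2):
--         mx = max(num[x - 2], num[x - 1], num[x + 1], num[x + 2])
--         if num[x] > mx:
--             result += num[x] - mx
--     return result
-- ===== Notes on version B (the rewrite author's own statement) =====
-- stated objective: faster
-- what changed: Replaces A's per-window list building with five repeated bubble sorts and a 'center == window max, subtract second-largest' test by a direct comparison of the center against the max of its four neighbors (ties contribute 0 either way), removing all sorting.
import Mathlib
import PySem

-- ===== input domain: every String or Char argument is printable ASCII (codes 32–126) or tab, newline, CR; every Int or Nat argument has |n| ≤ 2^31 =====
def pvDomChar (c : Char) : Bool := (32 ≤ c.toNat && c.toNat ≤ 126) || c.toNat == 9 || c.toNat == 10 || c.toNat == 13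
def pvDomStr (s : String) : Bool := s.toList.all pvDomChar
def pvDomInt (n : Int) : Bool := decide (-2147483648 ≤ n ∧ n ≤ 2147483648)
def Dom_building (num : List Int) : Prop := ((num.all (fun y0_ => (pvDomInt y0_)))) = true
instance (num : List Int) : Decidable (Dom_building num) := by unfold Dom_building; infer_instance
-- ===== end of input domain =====

-- B replaces A's per-window repeated bubble sorting with a direct comparison of the
-- center against the max of its four neighbors (faster by a constant factor: no sorting).


-- ===== PORT A =====
-- inner loop of bubble_sort: 'for i in range(n): if li[i]>li[i+1]: swap' as the obvious
-- structural recursion (fuel n = number of adjacent comparisons, from the left)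
def bubblePass : List Int → Nat → List Int
  | l, 0 => l
  | a :: b :: t, n + 1 => if a > b then b :: bubblePass (a :: t) n else a :: bubblePass (b :: t) n
  | l, _ + 1 => l

-- bubble_sort(li): 'for x in range(len(li)): <pass with len(li)-1-x comparisons>'
def bubbleSortP (li : List Int) : List Int :=
  (List.range li.length).foldl (fun acc x => bubblePass acc (li.length - 1 - x)) li

def building (num : List Int) : Int :=
  (PySem.List.pyRange 2 (PySem.List.len num - 2) 1).foldl (fun result x =>
    let sum_list := (PySem.List.pyRange (x - 2) (x + 3) 1).foldl
      (fun sl i => bubbleSortP (sl ++ [PySem.List.pyGetD num i 0])) []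
    if PySem.List.pyGetD num x 0 = PySem.List.pyGetD sum_list (-1) 0 then
      result + (PySem.List.pyGetD sum_list (-1) 0 - PySem.List.pyGetD sum_list (-2) 0)
    else result) 0

-- ===== PORT B =====
def building_alt (num : List Int) : Int :=
  (PySem.List.pyRange 2 (PySem.List.len num - 2) 1).foldl (fun result x =>
    let mx := max (max (max (PySem.List.pyGetD num (x - 2) 0) (PySem.List.pyGetD num (x - 1) 0))
      (PySem.List.pyGetD num (x + 1) 0)) (PySem.List.pyGetD num (x + 2) 0)
    if PySem.List.pyGetD num x 0 > mx then result + (PySem.List.pyGetD num x 0 - mx)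
    else result) 0

-- ===== PRECONDITION & SPEC =====
def Spec_building (num : List Int) (out : Int) : Prop := out = building_alt num
instance (num : List Int) (out : Int) : Decidable (Spec_building num out) := by unfold Spec_building; infer_instance

-- ===== CLAIM (what is proved, stated in full; the proofs are below) =====
def Claim_equal_building : Prop := ∀ (num : List Int), Dom_building num → Spec_building num (building num)

-- ===== LEMMAS AND PROOFS =====

theorem bubblePass_length (n : Nat) : ∀ l : List Int, (bubblePass l n).length = l.length := by
  induction n with
  | zero => intro l; rfl
  | succ n ih =>
    intro l
    match l with
    | [] => rfl
    | [a] => rfl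
    | a :: b :: t =>
      simp only [bubblePass]
      split <;> simp [ih]

theorem bubblePass_perm (n : Nat) : ∀ l : List Int, (bubblePass l n).Perm l := by
  induction n with
  | zero => intro l; rfl
  | succ n ih =>
    intro l
    match l with
    | [] => rfl
    | [a] => rfl
    | a :: b :: t =>
      simp only [bubblePass]
      split
      · exact ((ih (a :: t)).cons b).trans (List.Perm.swap a b t)
      · exact (ih (b :: t)).cons a

theorem bubblePass_append (n : Nat) : ∀ u s : List Int, n ≤ u.length - 1 →
    bubblePass (u ++ s) n = bubblePass u n ++ s := by
  induction n with
  | zero => intro u s _; rfl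
  | succ n ih =>
    intro u s h
    match u with
    | [] => simp at h
    | [a] => simp at h
    | a :: b :: t =>
      simp only [List.cons_append, bubblePass]
      have ht : n ≤ (a :: t).length - 1 := by simp at h ⊢; omega
      split
      · rw [show a :: (t ++ s) = (a :: t) ++ s from rfl, ih (a :: t) s ht]
        simp
      · rw [show b :: (t ++ s) = (b :: t) ++ s from rfl, ih (b :: t) s (by simpa using ht)]
        simp

theorem bubblePass_last (n : Nat) : ∀ u : List Int, u.length = n + 1 →
    ∃ t m, bubblePass u n = t ++ [m] ∧ ∀ y ∈ u, y ≤ m := by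
  induction n with
  | zero =>
    intro u h
    match u with
    | [a] => exact ⟨[], a, rfl, by simp⟩
  | succ n ih =>
    intro u h
    match u with
    | a :: b :: t =>
      have hlen : (t.length) = n := by simpa using h
      simp only [bubblePass]
      split
      · rename_i hab
        obtain ⟨t', m, he, hm⟩ := ih (a :: t) (by simp [hlen])
        refine ⟨b :: t', m, by simp [he], ?_⟩
        intro y hy
        simp only [List.mem_cons] at hy
        have hma := hm a (by simp)
        rcases hy with h | h | h
        · omega
        · omega
        · exact hm y (by simp [h])
      · rename_i hab
        obtain ⟨t', m, he, hm⟩ := ih (b :: t) (by simp [hlen])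
        refine ⟨a :: t', m, by simp [he], ?_⟩
        intro y hy
        simp only [List.mem_cons] at hy
        have hmb := hm b (by simp)
        rcases hy with h | h | h
        · omega
        · omega
        · exact hm y (by simp [h])

theorem bubble_fold_aux (m : Nat) : ∀ (N : Nat) (u s : List Int), u.length = m → m + s.length = N →
    s.Pairwise (· ≤ ·) → (∀ a ∈ u, ∀ b ∈ s, a ≤ b) →
    ((List.range' (N - m) m).foldl (fun acc x => bubblePass acc (N - 1 - x)) (u ++ s)).Perm (u ++ s) ∧
    ((List.range' (N - m) m).foldl (fun acc x => bubblePass acc (N - 1 - x)) (u ++ s)).Pairwise (· ≤ ·) := by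
  induction m with
  | zero =>
    intro N u s hu hN hs _
    have : u = [] := List.eq_nil_of_length_eq_zero hu
    subst this
    constructor
    · simp
    · simpa using hs
  | succ m ih =>
    intro N u s hu hN hs hub
    have hNm : N - (m + 1) + 1 = N - m := by omega
    rw [List.range'_succ, hNm]
    have hb : N - 1 - (N - (m + 1)) = m := by omega
    simp only [List.foldl_cons, hb]
    rw [bubblePass_append m u s (by omega)]
    obtain ⟨t, mx, he, hm⟩ := bubblePass_last m u (by omega)
    have hperm : (bubblePass u m).Perm u := bubblePass_perm m u
    have hmxu : mx ∈ u := hperm.mem_iff.mp (by simp [he])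
    have htu : ∀ y ∈ t, y ∈ u := fun y hy => hperm.mem_iff.mp (by simp [he, hy])
    have htlen : t.length = m := by
      have := bubblePass_length m u
      rw [he] at this; simp at this; omega
    rw [he, show (t ++ [mx]) ++ s = t ++ (mx :: s) from by simp]
    have hpc : (mx :: s).Pairwise (· ≤ ·) :=
      List.Pairwise.cons (fun b hbs => hub mx hmxu b hbs) hs
    have hub' : ∀ a ∈ t, ∀ b ∈ (mx :: s), a ≤ b := by
      intro a ha b hbb
      rcases List.mem_cons.mp hbb with rfl | hbb
      · exact hm a (htu a ha)
      · exact hub a (htu a ha) b hbb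
    have key := ih N t (mx :: s) htlen (by simp at hN ⊢; omega) hpc hub'
    have hap : (t ++ (mx :: s)).Perm (u ++ s) := by
      have h1 : (t ++ [mx]).Perm u := he ▸ hperm
      have h2 : ((t ++ [mx]) ++ s).Perm (u ++ s) := h1.append_right s
      exact (List.Perm.of_eq (by simp)).trans h2
    exact ⟨key.1.trans hap, key.2⟩

theorem bubbleSortP_perm (l : List Int) : (bubbleSortP l).Perm l := by
  have h := bubble_fold_aux l.length l.length l [] rfl (by simp) (by simp) (by simp)
  simpa [bubbleSortP, List.range_eq_range'] using h.1

theorem bubbleSortP_pairwise (l : List Int) : (bubbleSortP l).Pairwise (· ≤ ·) := by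
  have h := bubble_fold_aux l.length l.length l [] rfl (by simp) (by simp) (by simp)
  simpa [bubbleSortP, List.range_eq_range'] using h.2

-- the per-window key fact: A's "center = window max → add max - second max" equals
-- B's "center > neighbor max → add the gap"
theorem key_window (a b c d e s0 s1 s2 s3 s4 r : Int)
    (hp : List.Perm [s0, s1, s2, s3, s4] [a, b, c, d, e])
    (h01 : s0 ≤ s1) (h12 : s1 ≤ s2) (h23 : s2 ≤ s3) (h34 : s3 ≤ s4) :
    (if c = s4 then r + (s4 - s3) else r) =
    (if c > max (max (max a b) d) e then r + (c - max (max (max a b) d) e) else r) := by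
  set M := max (max (max a b) d) e with hM
  have hmem : ∀ y, y ∈ [s0, s1, s2, s3, s4] ↔ y ∈ [a, b, c, d, e] := fun y => hp.mem_iff
  have hle4 : ∀ y ∈ ([a, b, c, d, e] : List Int), y ≤ s4 := by
    intro y hy
    have := (hmem y).mpr hy
    simp at this
    rcases this with h | h | h | h | h <;> omega
  have hs4 : s4 = a ∨ s4 = b ∨ s4 = c ∨ s4 = d ∨ s4 = e := by
    have := (hmem s4).mp (by simp)
    simpa using this
  have hcle : c ≤ s4 := hle4 c (by simp)
  have hMle : M ≤ s4 := by
    have ha := hle4 a (by simp); have hb := hle4 b (by simp)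
    have hd := hle4 d (by simp); have he := hle4 e (by simp)
    omega
  by_cases hMc : M < c
  · -- center strictly above all neighbors: s4 = c and s3 = M
    have hs4c : s4 = c := by rcases hs4 with h | h | h | h | h <;> omega
    have hs3 : s3 = a ∨ s3 = b ∨ s3 = c ∨ s3 = d ∨ s3 = e := by
      have := (hmem s3).mp (by simp)
      simpa using this
    have hs3c : s3 ≠ c := by
      intro hs3c
      have hcnt := hp.count_eq c
      have hac : a ≠ c := by omega
      have hbc : b ≠ c := by omega
      have hdc : d ≠ c := by omega
      have hec : e ≠ c := by omega
      simp [List.count_cons, hs3c, hs4c, hac, hbc, hdc, hec] at hcnt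
      split_ifs at hcnt <;> omega
    have hs3M : s3 ≤ M := by rcases hs3 with h | h | h | h | h <;> omega
    have hMs3 : M ≤ s3 := by
      have hMw : M ∈ [a, b, c, d, e] := by
        have hMmem : M = a ∨ M = b ∨ M = d ∨ M = e := by omega
        simp
        omega
      have := (hmem M).mpr hMw
      simp at this
      rcases this with h | h | h | h | h <;> omega
    rw [if_pos hs4c.symm, if_pos hMc]
    omega
  · -- center not above every neighbor: both sides add nothing
    rw [if_neg hMc]
    by_cases hc4 : c = s4
    · -- c ties the window max: the max occurs twice among s, so s3 = s4
      have hcM : c = M := by omega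
      have hs34 : s3 = s4 := by
        by_contra hne
        have hcnt := hp.count_eq M
        have h0 : s0 ≠ M := by omega
        have h1 : s1 ≠ M := by omega
        have h2 : s2 ≠ M := by omega
        have h3 : s3 ≠ M := by omega
        have h4 : s4 = M := by omega
        have hMmem : M = a ∨ M = b ∨ M = d ∨ M = e := by omega
        simp [List.count_cons, h0, h1, h2, h3, h4] at hcnt
        rcases hMmem with h | h | h | h <;> (split_ifs at hcnt <;> omega)
      rw [if_pos hc4]
      omega
    · rw [if_neg hc4]

theorem range5 (x : Int) :
    PySem.List.pyRange (x - 2) (x + 3) 1 = [x - 2, x - 1, x, x + 1, x + 2] := by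
  rw [PySem.List.pyRange_one_cons (by omega), show x - 2 + 1 = x - 1 from by ring,
      PySem.List.pyRange_one_cons (by omega), show x - 1 + 1 = x from by ring,
      PySem.List.pyRange_one_cons (by omega),
      PySem.List.pyRange_one_cons (by omega), show x + 1 + 1 = x + 2 from by ring,
      PySem.List.pyRange_one_cons (by omega), show x + 2 + 1 = x + 3 from by ring,
      PySem.List.pyRange_one_eq_nil (by omega)]

-- the five-fold bubble-sorted accumulation is a sorted permutation of the window
theorem build5 (v1 v2 v3 v4 v5 : Int) :
    (bubbleSortP (bubbleSortP (bubbleSortP (bubbleSortP (bubbleSortP [v1] ++ [v2]) ++ [v3]) ++ [v4]) ++ [v5])).Perm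
      [v1, v2, v3, v4, v5] ∧
    (bubbleSortP (bubbleSortP (bubbleSortP (bubbleSortP (bubbleSortP [v1] ++ [v2]) ++ [v3]) ++ [v4]) ++ [v5])).Pairwise
      (· ≤ ·) := by
  refine ⟨?_, bubbleSortP_pairwise _⟩
  have q1 : (bubbleSortP [v1]).Perm [v1] := bubbleSortP_perm [v1]
  have q2 : (bubbleSortP (bubbleSortP [v1] ++ [v2])).Perm [v1, v2] :=
    (bubbleSortP_perm _).trans ((q1.append_right [v2]).trans (List.Perm.of_eq rfl))
  have q3 : (bubbleSortP (bubbleSortP (bubbleSortP [v1] ++ [v2]) ++ [v3])).Perm [v1, v2, v3] :=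
    (bubbleSortP_perm _).trans ((q2.append_right [v3]).trans (List.Perm.of_eq rfl))
  have q4 : (bubbleSortP (bubbleSortP (bubbleSortP (bubbleSortP [v1] ++ [v2]) ++ [v3]) ++ [v4])).Perm [v1, v2, v3, v4] :=
    (bubbleSortP_perm _).trans ((q3.append_right [v4]).trans (List.Perm.of_eq rfl))
  exact (bubbleSortP_perm _).trans ((q4.append_right [v5]).trans (List.Perm.of_eq rfl))

-- one loop-body step of A equals one loop-body step of B, for arbitrary window values
theorem step_eq (v1 v2 v3 v4 v5 r : Int) (T : List Int)
    (hp : T.Perm [v1, v2, v3, v4, v5]) (hpw : T.Pairwise (· ≤ ·)) :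
    (if v3 = PySem.List.pyGetD T (-1) 0 then
      r + (PySem.List.pyGetD T (-1) 0 - PySem.List.pyGetD T (-2) 0)
    else r) =
    (if v3 > max (max (max v1 v2) v4) v5 then r + (v3 - max (max (max v1 v2) v4) v5) else r) := by
  have hlen : T.length = 5 := by simpa using hp.length_eq
  obtain ⟨s0, s1, s2, s3, s4, rfl⟩ : ∃ s0 s1 s2 s3 s4, T = [s0, s1, s2, s3, s4] := by
    rcases T with _ | ⟨s0, _ | ⟨s1, _ | ⟨s2, _ | ⟨s3, _ | ⟨s4, _ | ⟨s5, t⟩⟩⟩⟩⟩⟩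
    all_goals first | (exact ⟨_, _, _, _, _, rfl⟩) | (exfalso; simp at hlen)
  simp only [List.pairwise_cons, List.mem_cons] at hpw
  have h01 : s0 ≤ s1 := by tauto
  have h12 : s1 ≤ s2 := by tauto
  have h23 : s2 ≤ s3 := by tauto
  have h34 : s3 ≤ s4 := by tauto
  have hget1 : PySem.List.pyGetD [s0, s1, s2, s3, s4] (-1) 0 = s4 := rfl
  have hget2 : PySem.List.pyGetD [s0, s1, s2, s3, s4] (-2) 0 = s3 := rfl
  rw [hget1, hget2]
  exact key_window _ _ _ _ _ s0 s1 s2 s3 s4 r hp h01 h12 h23 h34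

-- ===== VERDICT (by name: the statement is the Claim_ definition above) =====
theorem building_spec : Claim_equal_building := by
  intro num _
  unfold Spec_building building building_alt
  apply PySem.List.foldl_congr_mem
  intro r x _
  simp only [range5 x, List.foldl_cons, List.foldl_nil, List.nil_append]
  obtain ⟨hp, hpw⟩ := build5 (PySem.List.pyGetD num (x - 2) 0) (PySem.List.pyGetD num (x - 1) 0)
    (PySem.List.pyGetD num x 0) (PySem.List.pyGetD num (x + 1) 0) (PySem.List.pyGetD num (x + 2) 0)
  exact step_eq _ _ _ _ _ r _ hp hpw
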